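-- pv_equiv track=rewrite | github.com/FusionX9000/Advent-of-Code-2020 | solutions/Day17.py | create_universe
-- ===== SOURCE A (Python) =====
-- def create_universe(grid, limit):
--     X, Y, Z, W = 2*limit + len(grid[0]), 2 * \
--         limit + len(grid), 2*limit+1, 2*limit+1
--
--     space = [[[['.' for x in range(X)] for y in range(Y)]
--               for z in range(Z)] for w in range(W)]
--
--     start_x = start_y = limit
--     for x in range(len(grid[0])):
--         for y in range(len(grid)):
--             space[W//2][Z//2][y+start_y][x+start_x] = grid[y][x]
--     return space
-- ===== SOURCE B (Python) =====
-- def create_universe(grid, limit):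
--     X = 2*limit + len(grid[0])
--     Y = 2*limit + len(grid)
--     Z = 2*limit + 1
--     W = 2*limit + 1
--     return [[[[grid[y - limit][x - limit]
--                if w == W // 2 and z == Z // 2
--                   and limit <= y < limit + len(grid)
--                   and limit <= x < limit + len(grid[0])
--                else '.'
--                for x in range(X)]
--               for y in range(Y)]
--              for z in range(Z)]
--             for w in range(W)]
-- ===== Notes on version B (the rewrite author's own statement) =====
-- stated objective: simpler
-- what changed: Replaces A's two-pass build (fill a dense 4D grid with '.' then overwrite the central plane in a nested index-assignment loop) with one nested comprehension that computes each cell directly from its coordinates.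
import Mathlib
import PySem

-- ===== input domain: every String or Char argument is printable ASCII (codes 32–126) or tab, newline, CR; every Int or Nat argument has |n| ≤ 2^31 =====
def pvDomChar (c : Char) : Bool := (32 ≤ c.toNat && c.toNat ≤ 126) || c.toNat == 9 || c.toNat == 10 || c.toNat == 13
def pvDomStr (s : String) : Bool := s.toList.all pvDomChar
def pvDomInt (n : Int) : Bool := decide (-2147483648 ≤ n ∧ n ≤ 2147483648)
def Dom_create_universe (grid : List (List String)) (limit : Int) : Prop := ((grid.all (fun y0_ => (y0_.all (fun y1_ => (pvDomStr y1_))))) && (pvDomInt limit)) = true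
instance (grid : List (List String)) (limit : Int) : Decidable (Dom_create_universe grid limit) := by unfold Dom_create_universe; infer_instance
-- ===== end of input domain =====

-- B replaces A's fill-then-overwrite two-pass build with a single comprehension computing each cell; objective: simpler.

-- ===== PORT A =====
-- 'space[i][j][k][l] = v' is an in-place update of the nested list: read the sublist at a
-- (possibly negative) index, update inside it, write it back; out-of-range = IndexError = no-op
-- here (those inputs are outside Pre_).
def pvUpd1 {α : Type} (xs : List α) (i : Int) (f : α → α) : List α :=
  match PySem.List.pyGet? xs i with
  | some x => PySem.List.pySetD xs i (f x)
  | none => xs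

def create_universe (grid : List (List String)) (limit : Int) : List (List (List (List String))) :=
  let X : Int := 2*limit + ((PySem.List.pyGetD grid 0 []).length : Int)
  let Y : Int := 2*limit + (grid.length : Int)
  let Z : Int := 2*limit + 1
  let W : Int := 2*limit + 1
  let space : List (List (List (List String))) :=
    (PySem.List.pyRange 0 W 1).map (fun _ =>
      (PySem.List.pyRange 0 Z 1).map (fun _ =>
        (PySem.List.pyRange 0 Y 1).map (fun _ =>
          (PySem.List.pyRange 0 X 1).map (fun _ => "."))))
  (PySem.List.pyRange 0 ((PySem.List.pyGetD grid 0 []).length : Int) 1).foldl (fun space x =>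
    (PySem.List.pyRange 0 (grid.length : Int) 1).foldl (fun space y =>
      pvUpd1 space (PySem.Int.floordiv W 2) (fun sz =>
        pvUpd1 sz (PySem.Int.floordiv Z 2) (fun sy =>
          pvUpd1 sy (y + limit) (fun row =>
            PySem.List.pySetD row (x + limit)
              (PySem.List.pyGetD (PySem.List.pyGetD grid y []) x "."))))) space) space

-- ===== PORT B =====
def create_universe_alt (grid : List (List String)) (limit : Int) : List (List (List (List String))) :=
  let n0 : Int := ((PySem.List.pyGetD grid 0 []).length : Int)
  let n : Int := (grid.length : Int)
  let X : Int := 2*limit + n0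
  let Y : Int := 2*limit + n
  let Z : Int := 2*limit + 1
  let W : Int := 2*limit + 1
  (PySem.List.pyRange 0 W 1).map (fun w =>
    (PySem.List.pyRange 0 Z 1).map (fun z =>
      (PySem.List.pyRange 0 Y 1).map (fun y =>
        (PySem.List.pyRange 0 X 1).map (fun x =>
          if w = PySem.Int.floordiv W 2 ∧ z = PySem.Int.floordiv Z 2 ∧
             limit ≤ y ∧ y < limit + n ∧ limit ≤ x ∧ x < limit + n0
          then PySem.List.pyGetD (PySem.List.pyGetD grid (y - limit) []) (x - limit) "."
          else "."))))

-- ===== PRECONDITION & SPEC =====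
-- Pre_ is exactly where the Python A returns: grid nonempty (grid[0] else raises), and — when the
-- first row is nonempty, so the overwrite loops run — limit ≥ 0 (else space[W//2] raises on the
-- empty space list) and every row at least as long as row 0 (else grid[y][x] raises).
def Pre_create_universe (grid : List (List String)) (limit : Int) : Prop :=
  grid ≠ [] ∧ (PySem.List.pyGetD grid 0 [] ≠ [] →
    0 ≤ limit ∧ ∀ row ∈ grid, (PySem.List.pyGetD grid 0 []).length ≤ row.length)
instance (grid : List (List String)) (limit : Int) : Decidable (Pre_create_universe grid limit) := by
  unfold Pre_create_universe; infer_instance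

def pvWitness_create_universe : List (List String) × Int := ([["#", "."], [".", "#"]], 1)

def Spec_create_universe (grid : List (List String)) (limit : Int) (out : List (List (List (List String)))) : Prop := out = create_universe_alt grid limit
instance (grid : List (List String)) (limit : Int) (out : List (List (List (List String)))) : Decidable (Spec_create_universe grid limit out) := by unfold Spec_create_universe; infer_instance

-- ===== CLAIM (what is proved, stated in full; the proofs are below) =====
def Claim_equal_create_universe : Prop := ∀ (grid : List (List String)) (limit : Int), Dom_create_universe grid limit → Pre_create_universe grid limit → Spec_create_universe grid limit (create_universe grid limit)

-- ===== LEMMAS AND PROOFS =====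

-- the value written at (row y, column x): grid[y][x]
def pvCell (grid : List (List String)) (y x : Nat) : String :=
  (grid.getD y []).getD x "."

-- double lookup into a plane
def pvGet2 {α : Type} (p : List (List α)) (r c : Nat) : Option α :=
  p[r]?.bind (fun row => row[c]?)

lemma pv_getElem?_pySetD {α : Type} (row : List α) (n c : Nat) (v : α) :
    (PySem.List.pySetD row ((n : Nat) : Int) v)[c]? = if c = n then row[c]?.map (fun _ => v) else row[c]? := by
  rw [PySem.List.pySetD_natCast, List.getElem?_set]
  by_cases h : c = n
  · subst h
    by_cases hl : c < row.length
    · rw [if_pos rfl, if_pos hl, List.getElem?_eq_getElem hl]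
      simp
    · rw [if_pos rfl, if_neg hl, List.getElem?_eq_none (Nat.le_of_not_lt hl)]
      simp
  · rw [if_neg (fun hh : n = c => h hh.symm), if_neg h]

lemma pv_length_upd1 {α : Type} (xs : List α) (i : Int) (f : α → α) :
    (pvUpd1 xs i f).length = xs.length := by
  unfold pvUpd1
  cases h : PySem.List.pyGet? xs i <;> simp [PySem.List.length_pySetD]

lemma pv_getElem?_upd1 {α : Type} (xs : List α) (n : Nat) (f : α → α) (k : Nat) :
    (pvUpd1 xs ((n : Nat) : Int) f)[k]? = if k = n then xs[k]?.map f else xs[k]? := by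
  unfold pvUpd1
  rw [PySem.List.pyGet?_natCast]
  cases h : xs[n]? with
  | none =>
    by_cases hk : k = n
    · subst hk; rw [if_pos rfl, h]; rfl
    · rw [if_neg hk]
  | some x =>
    rw [pv_getElem?_pySetD]
    by_cases hk : k = n
    · subst hk; rw [if_pos rfl, if_pos rfl, h]; rfl
    · rw [if_neg hk, if_neg hk]

-- a fold of updates all at the same index n collapses to one update by the folded function
lemma pv_foldl_upd1_getElem? {α β : Type} (F : β → α → α) (n : Nat) (l : List β) (s : List α) (w : Nat) :
    (l.foldl (fun s b => pvUpd1 s ((n : Nat) : Int) (F b)) s)[w]? =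
      if w = n then s[w]?.map (fun t => l.foldl (fun t b => F b t) t) else s[w]? := by
  induction l generalizing s with
  | nil => by_cases h : w = n <;> simp [h]
  | cons b rest ih =>
    simp only [List.foldl_cons]
    rw [ih, pv_getElem?_upd1]
    by_cases h : w = n
    · subst h; simp [Option.map_map]; cases s[w]? <;> simp
    · simp [h]

lemma pv_foldl_length {α β : Type} (step : List α → β → List α)
    (h : ∀ s b, (step s b).length = s.length) (l : List β) (s : List α) :
    (l.foldl step s).length = s.length := by
  induction l generalizing s with
  | nil => rfl
  | cons b rest ih => simp only [List.foldl_cons]; rw [ih, h]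

-- inner loop over y (one fixed column x): row r receives one write at column x+nl when nl ≤ r < nl+t
lemma pv_yfold (grid : List (List String)) (nl x t : Nat) (pl : List (List String)) (r : Nat) :
    ((List.range t).foldl
        (fun pl y => pvUpd1 pl (((y + nl : Nat)) : Int)
          (fun row => PySem.List.pySetD row (((x + nl : Nat)) : Int) (pvCell grid y x))) pl)[r]? =
      if nl ≤ r ∧ r < nl + t then
        pl[r]?.map (fun row => PySem.List.pySetD row (((x + nl : Nat)) : Int) (pvCell grid (r - nl) x))
      else pl[r]? := by
  induction t with
  | zero => simp only [List.range_zero, List.foldl_nil]; rw [if_neg (by omega)]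
  | succ t ih =>
    rw [List.range_succ, List.foldl_append, List.foldl_cons, List.foldl_nil, pv_getElem?_upd1, ih]
    by_cases hr : r = t + nl
    · subst hr
      rw [if_pos rfl, if_neg (by omega), if_pos (by omega)]
      have ht : t + nl - nl = t := by omega
      rw [ht]
    · rw [if_neg hr]
      by_cases hin : nl ≤ r ∧ r < nl + t
      · rw [if_pos hin, if_pos (by omega)]
      · rw [if_neg hin, if_neg (by omega)]

-- outer loop over x: after m columns, cells (r,c) with nl ≤ r < nl+nN, nl ≤ c < nl+m hold grid values
lemma pv_xfold (grid : List (List String)) (nl nN m : Nat) (pl : List (List String)) (r c : Nat) :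
    pvGet2 ((List.range m).foldl
        (fun pl x => (List.range nN).foldl
          (fun pl y => pvUpd1 pl (((y + nl : Nat)) : Int)
            (fun row => PySem.List.pySetD row (((x + nl : Nat)) : Int) (pvCell grid y x))) pl) pl) r c =
      if nl ≤ r ∧ r < nl + nN ∧ nl ≤ c ∧ c < nl + m then
        (pvGet2 pl r c).map (fun _ => pvCell grid (r - nl) (c - nl))
      else pvGet2 pl r c := by
  induction m with
  | zero => simp only [List.range_zero, List.foldl_nil]; rw [if_neg (by omega)]
  | succ m ih =>
    rw [List.range_succ, List.foldl_append, List.foldl_cons, List.foldl_nil]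
    unfold pvGet2 at ih ⊢
    rw [pv_yfold]
    by_cases hr : nl ≤ r ∧ r < nl + nN
    · rw [if_pos hr]
      rcases hpm : ((List.range m).foldl
          (fun pl x => (List.range nN).foldl
            (fun pl y => pvUpd1 pl (((y + nl : Nat)) : Int)
              (fun row => PySem.List.pySetD row (((x + nl : Nat)) : Int) (pvCell grid y x))) pl) pl)[r]? with _ | row
      · rw [hpm] at ih
        simp only [Option.map_none, Option.bind_none]
        have h2 : (pl[r]?.bind fun a => a[c]?) = none := by
          split_ifs at ih with hc
          · exact Option.map_eq_none_iff.mp ih.symm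
          · exact ih.symm
        rw [h2]
        split_ifs <;> simp
      · rw [hpm] at ih
        simp only [Option.map_some, Option.bind_some]
        rw [pv_getElem?_pySetD]
        simp only [Option.bind_some] at ih
        by_cases hc : c = m + nl
        · rw [if_pos hc]
          rw [if_neg (by omega)] at ih
          rw [ih, if_pos (by omega)]
          have hm : c - nl = m := by omega
          rw [hm]
        · rw [if_neg hc, ih]
          by_cases hin : nl ≤ r ∧ r < nl + nN ∧ nl ≤ c ∧ c < nl + m
          · rw [if_pos hin, if_pos (by omega)]
          · rw [if_neg hin, if_neg (by omega)]
    · rw [if_neg hr, ih,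
        if_neg (fun h => hr ⟨h.1, h.2.1⟩), if_neg (fun h => hr ⟨h.1, h.2.1⟩)]

lemma pvCell_def (grid : List (List String)) (y x : Nat) :
    (grid.getD y []).getD x "." = pvCell grid y x := rfl

-- A, normalised: folds over List.range with Nat-cast indices, starting from the dense '.'-grid
lemma pv_norm_A (grid : List (List String)) (nl : Nat) :
    create_universe grid ((nl : Nat) : Int) =
      (List.range (PySem.List.pyGetD grid 0 []).length).foldl (fun s x =>
        (List.range grid.length).foldl (fun s y =>
          pvUpd1 s ((nl : Nat) : Int) (fun sz =>
            pvUpd1 sz ((nl : Nat) : Int) (fun sy =>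
              pvUpd1 sy (((y + nl : Nat)) : Int) (fun row =>
                PySem.List.pySetD row (((x + nl : Nat)) : Int) (pvCell grid y x))))) s)
      ((List.range (2*nl+1)).map (fun _ =>
        (List.range (2*nl+1)).map (fun _ =>
          (List.range (2*nl+grid.length)).map (fun _ =>
            (List.range (2*nl+(PySem.List.pyGetD grid 0 []).length)).map (fun _ => "."))))) := by
  have hfd : PySem.Int.floordiv (2*((nl:Nat):Int)+1) 2 = ((nl:Nat):Int) := by
    rw [PySem.Int.floordiv_eq_ediv_of_pos (by omega)]; omega
  have h1 : ((2*((nl:Nat):Int)+1)).toNat = 2*nl+1 := by omega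
  have h2 : ((2*((nl:Nat):Int)+(grid.length : Int))).toNat = 2*nl+grid.length := by omega
  have h3 : ((2*((nl:Nat):Int)+((PySem.List.pyGetD grid 0 []).length : Int))).toNat
      = 2*nl+(PySem.List.pyGetD grid 0 []).length := by omega
  simp only [create_universe, hfd, PySem.List.pyRange_one, List.foldl_map, List.map_map,
    zero_add, Int.sub_zero, h1, h2, h3, Int.toNat_natCast, Function.comp_def,
    PySem.List.pyGetD_natCast, pvCell_def, ← Nat.cast_add]

-- B, normalised: maps over List.range with the cell condition on Nat indices
lemma pv_norm_B (grid : List (List String)) (nl : Nat) :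
    create_universe_alt grid ((nl : Nat) : Int) =
      (List.range (2*nl+1)).map (fun w =>
        (List.range (2*nl+1)).map (fun z =>
          (List.range (2*nl+grid.length)).map (fun y =>
            (List.range (2*nl+(PySem.List.pyGetD grid 0 []).length)).map (fun x =>
              if w = nl ∧ z = nl ∧ nl ≤ y ∧ y < nl + grid.length ∧
                 nl ≤ x ∧ x < nl + (PySem.List.pyGetD grid 0 []).length
              then PySem.List.pyGetD (PySem.List.pyGetD grid ((y : Int) - ((nl:Nat):Int)) [])
                     ((x : Int) - ((nl:Nat):Int)) "."
              else ".")))) := by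
  have hfd : PySem.Int.floordiv (2*((nl:Nat):Int)+1) 2 = ((nl:Nat):Int) := by
    rw [PySem.Int.floordiv_eq_ediv_of_pos (by omega)]; omega
  have h1 : ((2*((nl:Nat):Int)+1)).toNat = 2*nl+1 := by omega
  have h2 : ((2*((nl:Nat):Int)+(grid.length : Int))).toNat = 2*nl+grid.length := by omega
  have h3 : ((2*((nl:Nat):Int)+((PySem.List.pyGetD grid 0 []).length : Int))).toNat
      = 2*nl+(PySem.List.pyGetD grid 0 []).length := by omega
  simp only [create_universe_alt, hfd, PySem.List.pyRange_one, List.map_map,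
    zero_add, Int.sub_zero, h1, h2, h3, Function.comp_def,
    Nat.cast_inj, Nat.cast_le, ← Nat.cast_add, Nat.cast_lt]

-- a fold of updates all at the same index collapses to one update by the folded function
lemma pv_foldl_upd1_eq {α β : Type} (F : β → α → α) (n : Nat) (l : List β) (s : List α) :
    l.foldl (fun s b => pvUpd1 s ((n : Nat) : Int) (F b)) s =
      pvUpd1 s ((n : Nat) : Int) (fun t => l.foldl (fun t b => F b t) t) := by
  apply List.ext_getElem?
  intro w
  rw [pv_foldl_upd1_getElem?, pv_getElem?_upd1]

lemma pv_case_empty (grid : List (List String)) (limit : Int)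
    (h0 : PySem.List.pyGetD grid 0 [] = []) :
    create_universe grid limit = create_universe_alt grid limit := by
  simp only [create_universe, create_universe_alt, h0, List.length_nil, Nat.cast_zero]
  rw [show PySem.List.pyRange 0 0 1 = [] from by rw [PySem.List.pyRange_one]; simp]
  simp only [List.foldl_nil]
  apply List.map_congr_left; intro w _
  apply List.map_congr_left; intro z _
  apply List.map_congr_left; intro y _
  apply List.map_congr_left; intro x _
  rw [if_neg]
  rintro ⟨-, -, -, -, h5, h6⟩
  omega

-- the central plane: the 2D fold of writes over the dot plane IS the comprehension plane
lemma pv_plane (grid : List (List String)) (nl : Nat) :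
    (List.range (PySem.List.pyGetD grid 0 []).length).foldl (fun pl x =>
        (List.range grid.length).foldl (fun pl y =>
          pvUpd1 pl (((y + nl : Nat)) : Int) (fun row =>
            PySem.List.pySetD row (((x + nl : Nat)) : Int) (pvCell grid y x))) pl)
      ((List.range (2*nl+grid.length)).map (fun _ =>
        (List.range (2*nl+(PySem.List.pyGetD grid 0 []).length)).map (fun _ => "."))) =
    (List.range (2*nl+grid.length)).map (fun y =>
      (List.range (2*nl+(PySem.List.pyGetD grid 0 []).length)).map (fun x =>
        if nl ≤ y ∧ y < nl + grid.length ∧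
           nl ≤ x ∧ x < nl + (PySem.List.pyGetD grid 0 []).length
        then PySem.List.pyGetD (PySem.List.pyGetD grid ((y : Int) - ((nl:Nat):Int)) [])
               ((x : Int) - ((nl:Nat):Int)) "."
        else ".")) := by
  have hlen : ((List.range (PySem.List.pyGetD grid 0 []).length).foldl (fun pl x =>
        (List.range grid.length).foldl (fun pl y =>
          pvUpd1 pl (((y + nl : Nat)) : Int) (fun row =>
            PySem.List.pySetD row (((x + nl : Nat)) : Int) (pvCell grid y x))) pl)
      ((List.range (2*nl+grid.length)).map (fun _ =>
        (List.range (2*nl+(PySem.List.pyGetD grid 0 []).length)).map (fun _ => ".")))).length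
      = 2*nl+grid.length := by
    rw [pv_foldl_length]
    · simp
    · intro s b
      rw [pv_foldl_length]
      intro s' b'
      exact pv_length_upd1 _ _ _
  apply List.ext_getElem?
  intro r
  by_cases hr : r < 2*nl+grid.length
  · obtain ⟨rowA, hAr⟩ : ∃ rowA, ((List.range (PySem.List.pyGetD grid 0 []).length).foldl (fun pl x =>
        (List.range grid.length).foldl (fun pl y =>
          pvUpd1 pl (((y + nl : Nat)) : Int) (fun row =>
            PySem.List.pySetD row (((x + nl : Nat)) : Int) (pvCell grid y x))) pl)
      ((List.range (2*nl+grid.length)).map (fun _ =>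
        (List.range (2*nl+(PySem.List.pyGetD grid 0 []).length)).map (fun _ => "."))))[r]? = some rowA := by
      rw [List.getElem?_eq_getElem (by omega)]
      exact ⟨_, rfl⟩
    rw [hAr, List.getElem?_map, List.getElem?_range hr, Option.map_some]
    congr 1
    apply List.ext_getElem?
    intro c
    have hget2 : rowA[c]? = pvGet2 ((List.range (PySem.List.pyGetD grid 0 []).length).foldl (fun pl x =>
        (List.range grid.length).foldl (fun pl y =>
          pvUpd1 pl (((y + nl : Nat)) : Int) (fun row =>
            PySem.List.pySetD row (((x + nl : Nat)) : Int) (pvCell grid y x))) pl)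
      ((List.range (2*nl+grid.length)).map (fun _ =>
        (List.range (2*nl+(PySem.List.pyGetD grid 0 []).length)).map (fun _ => ".")))) r c := by
      unfold pvGet2
      rw [hAr, Option.bind_some]
    rw [hget2, pv_xfold]
    unfold pvGet2
    rw [List.getElem?_map, List.getElem?_range hr, Option.map_some, Option.bind_some,
      List.getElem?_map]
    by_cases hc : c < 2*nl+(PySem.List.pyGetD grid 0 []).length
    · simp only [List.getElem?_range hc, List.getElem?_map, Option.map_some]
      by_cases hin : nl ≤ r ∧ r < nl + grid.length ∧ nl ≤ c ∧ c < nl + (PySem.List.pyGetD grid 0 []).length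
      · rw [if_pos hin, if_pos hin]
        congr 1
        have hy : (r : Int) - ((nl:Nat):Int) = (((r - nl : Nat)) : Int) := by omega
        have hx : (c : Int) - ((nl:Nat):Int) = (((c - nl : Nat)) : Int) := by omega
        rw [hy, hx, PySem.List.pyGetD_natCast, PySem.List.pyGetD_natCast, pvCell_def]
      · rw [if_neg hin, if_neg hin]
    · rw [List.getElem?_eq_none (by simp; omega), List.getElem?_eq_none (by simp; omega),
        Option.map_none, if_neg (by omega)]
  · rw [List.getElem?_eq_none (by omega), List.getElem?_eq_none (by simp; omega)]

lemma pv_case_main (grid : List (List String)) (nl : Nat) :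
    create_universe grid ((nl : Nat) : Int) = create_universe_alt grid ((nl : Nat) : Int) := by
  rw [pv_norm_A, pv_norm_B]
  simp only [pv_foldl_upd1_eq]
  apply List.ext_getElem?
  intro w
  rw [pv_getElem?_upd1, List.getElem?_map, List.getElem?_map]
  by_cases hw : w < 2*nl+1
  · rw [List.getElem?_range hw, Option.map_some, Option.map_some]
    by_cases hwn : nl = w
    · subst hwn
      rw [if_pos rfl, Option.map_some]
      congr 1
      apply List.ext_getElem?
      intro z
      rw [pv_getElem?_upd1, List.getElem?_map, List.getElem?_map]
      by_cases hz : z < 2*nl+1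
      · rw [List.getElem?_range hz, Option.map_some, Option.map_some]
        by_cases hzn : nl = z
        · subst hzn
          rw [if_pos rfl, Option.map_some]
          congr 1
          rw [pv_plane]
          apply List.map_congr_left; intro y _
          apply List.map_congr_left; intro x _
          by_cases hin : nl ≤ y ∧ y < nl + grid.length ∧
              nl ≤ x ∧ x < nl + (PySem.List.pyGetD grid 0 []).length
          · rw [if_pos hin, if_pos ⟨rfl, rfl, hin.1, hin.2.1, hin.2.2.1, hin.2.2.2⟩]
          · rw [if_neg hin, if_neg (fun h => hin ⟨h.2.2.1, h.2.2.2.1, h.2.2.2.2.1, h.2.2.2.2.2⟩)]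
        · rw [if_neg (fun h => hzn h.symm)]
          congr 1
          apply List.map_congr_left; intro y _
          apply List.map_congr_left; intro x _
          rw [if_neg (fun h => hzn h.2.1.symm)]
      · simp only [List.getElem?_eq_none
          (show (List.range (2*nl+1)).length ≤ z from by simp; omega), Option.map_none]
        split_ifs <;> rfl
    · rw [if_neg (fun h => hwn h.symm)]
      congr 1
      apply List.map_congr_left; intro z _
      apply List.map_congr_left; intro y _
      apply List.map_congr_left; intro x _
      rw [if_neg (fun h => hwn h.1.symm)]
  · simp only [List.getElem?_eq_none
      (show (List.range (2*nl+1)).length ≤ w from by simp; omega), Option.map_none]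
    split_ifs <;> rfl

theorem create_universe_spec : Claim_equal_create_universe := by
  intro grid limit _ hp
  unfold Spec_create_universe
  by_cases h0 : PySem.List.pyGetD grid 0 [] = []
  · exact pv_case_empty grid limit h0
  · obtain ⟨nl, rfl⟩ : ∃ nl : Nat, limit = ((nl : Nat) : Int) :=
      ⟨limit.toNat, (Int.toNat_of_nonneg (hp.2 h0).1).symm⟩
    exact pv_case_main grid nl
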